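-- pv_equiv track=rewrite | github.com/Adkid-Zephyr/Financial-research-agent-QBT | futures_research/agents/reviewer.py | _extract_section_after_heading
-- ===== SOURCE A (Python) =====
-- def _extract_section_after_heading(text: str, heading: str) -> str:
--     if heading not in text:
--         return ""
--     section = text.split(heading, 1)[1]
--     lines = []
--     for line in section.splitlines():
--         stripped = line.strip()
--         if not stripped:
--             if lines:
--                 break
--             continue
--         if stripped.startswith("## "):
--             break
--         lines.append(stripped.lstrip("> ").strip())
--     return " ".join(lines)
-- ===== SOURCE B (Python) =====
-- def _skip_blank(lines):
--     if lines and not lines[0]: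
--         return _skip_blank(lines[1:])
--     return lines
--
--
-- def _take_content(lines):
--     if not lines or not lines[0] or lines[0].startswith("## "):
--         return []
--     return [lines[0]] + _take_content(lines[1:])
--
--
-- def _extract_section_after_heading(text: str, heading: str) -> str:
--     if heading not in text:
--         return ""
--     stripped = [l.strip() for l in text.split(heading, 1)[1].splitlines()]
--     content = _take_content(_skip_blank(stripped))
--     return " ".join(l.lstrip("> ").strip() for l in content)
-- ===== Notes on version B (the rewrite author's own statement) =====
-- stated objective: simpler
-- what changed: Replaces A's single stateful loop with a break flag by a two-phase recursive decomposition: strip all lines once, recursively drop the leading blank lines, recursively take the content run until a blank or '## ' line, then join the transformed lines.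
import Mathlib
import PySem

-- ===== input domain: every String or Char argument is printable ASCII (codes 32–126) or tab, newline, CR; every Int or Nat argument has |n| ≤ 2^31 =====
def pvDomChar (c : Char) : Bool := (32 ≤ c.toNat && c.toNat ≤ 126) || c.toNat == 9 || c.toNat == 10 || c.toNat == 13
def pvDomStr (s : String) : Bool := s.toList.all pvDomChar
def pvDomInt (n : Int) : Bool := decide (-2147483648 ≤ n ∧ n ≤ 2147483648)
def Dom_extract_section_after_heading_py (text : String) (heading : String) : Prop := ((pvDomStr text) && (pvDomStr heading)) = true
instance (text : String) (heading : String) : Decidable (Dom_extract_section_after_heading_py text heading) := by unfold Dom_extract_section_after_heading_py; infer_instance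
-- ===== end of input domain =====

-- B replaces A's stateful break-flag loop by a two-phase recursive decomposition (drop leading blanks, take the content run); objective: simpler.

-- ===== PORT A =====
-- one iteration of A's for-loop; state = (lines accumulated so far, loop has broken)
def pvStepA (st : List (List Char) × Bool) (line : List Char) : List (List Char) × Bool :=
  if st.2 then st
  else
    let stripped := PySem.Chars.strip line
    if stripped = [] then
      if st.1 = [] then (st.1, false) else (st.1, true)
    else if PySem.Chars.startswith stripped ("## ".toList) then (st.1, true)
    else (st.1 ++ [PySem.Chars.strip (stripped.dropWhile (fun c => c == '>' || c == ' '))], false)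

def extract_section_after_heading_py (text : String) (heading : String) : String :=
  if PySem.Str.isIn heading text = false then ""
  else
    match PySem.Chars.splitMax? text.toList heading.toList 1 with
    | none => ""      -- heading = "": Python raises ValueError; excluded by Pre_
    | some parts =>
      match PySem.List.pyGet? parts 1 with
      | none => ""    -- unreachable: heading ∈ text gives two parts
      | some sec =>
        let st := (PySem.Chars.splitlines sec).foldl pvStepA ([], false)
        String.ofList (PySem.Chars.join " ".toList st.1)

-- ===== PORT B =====
def pvSkipBlank : List (List Char) → List (List Char)
  | [] => []
  | l :: ls => if l = [] then pvSkipBlank ls else l :: ls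

def pvTakeContent : List (List Char) → List (List Char)
  | [] => []
  | l :: ls =>
      if l = [] || PySem.Chars.startswith l ("## ".toList) then []
      else l :: pvTakeContent ls

def extract_section_after_heading_py_alt (text : String) (heading : String) : String :=
  if PySem.Str.isIn heading text = false then ""
  else
    match PySem.Chars.splitMax? text.toList heading.toList 1 with
    | none => ""      -- heading = "": Python raises ValueError; excluded by Pre_
    | some parts =>
      match PySem.List.pyGet? parts 1 with
      | none => ""    -- unreachable: heading ∈ text gives two parts
      | some sec =>
        let stripped := (PySem.Chars.splitlines sec).map PySem.Chars.strip
        let content := pvTakeContent (pvSkipBlank stripped)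
        String.ofList (PySem.Chars.join " ".toList
          (content.map (fun l => PySem.Chars.strip (l.dropWhile (fun c => c == '>' || c == ' ')))))

-- ===== PRECONDITION & SPEC =====
-- Pre_ excludes only heading = "", on which Python's text.split("", 1) raises ValueError (in both A and B).
def Pre_extract_section_after_heading_py (text : String) (heading : String) : Prop := heading ≠ ""
instance (text : String) (heading : String) : Decidable (Pre_extract_section_after_heading_py text heading) := by unfold Pre_extract_section_after_heading_py; infer_instance

def pvWitness_extract_section_after_heading_py : String × String :=
  ("## Risk\n> Good stuff.\nMore.\n\n## Next", "## Risk")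

def Spec_extract_section_after_heading_py (text : String) (heading : String) (out : String) : Prop := out = extract_section_after_heading_py_alt text heading
instance (text : String) (heading : String) (out : String) : Decidable (Spec_extract_section_after_heading_py text heading out) := by unfold Spec_extract_section_after_heading_py; infer_instance

-- ===== CLAIM (what is proved, stated in full; the proofs are below) =====
def Claim_equal_extract_section_after_heading_py : Prop := ∀ (text : String) (heading : String), Dom_extract_section_after_heading_py text heading → Pre_extract_section_after_heading_py text heading → Spec_extract_section_after_heading_py text heading (extract_section_after_heading_py text heading)

-- ===== LEMMAS AND PROOFS =====

-- once A's loop has broken, the rest of the fold is the identity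
lemma pvStepA_done (ls : List (List Char)) (acc : List (List Char)) :
    ls.foldl pvStepA (acc, true) = (acc, true) := by
  induction ls with
  | nil => rfl
  | cons l ls ih => simpa [pvStepA] using ih

-- after the first content line (acc ≠ []), A's loop takes the content run
lemma pvStepA_phase2 (ls : List (List Char)) (acc : List (List Char)) (h : acc ≠ []) :
    (ls.foldl pvStepA (acc, false)).1
      = acc ++ (pvTakeContent (ls.map PySem.Chars.strip)).map
          (fun l => PySem.Chars.strip (l.dropWhile (fun c => c == '>' || c == ' '))) := by
  induction ls generalizing acc with
  | nil => simp [pvTakeContent]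
  | cons l ls ih =>
    by_cases hb : PySem.Chars.strip l = []
    · simp [List.foldl_cons, pvStepA, hb, h, pvStepA_done, pvTakeContent]
    · by_cases hs : PySem.Chars.startswith (PySem.Chars.strip l) ['#', '#', ' '] = true
      · simp [List.foldl_cons, pvStepA, hb, hs, pvStepA_done, pvTakeContent]
      · have hne : acc ++ [PySem.Chars.strip ((PySem.Chars.strip l).dropWhile (fun c => c == '>' || c == ' '))] ≠ [] := by simp
        simp [List.foldl_cons, pvStepA, hb, hs, ih _ hne, pvTakeContent]

-- from the start, A's loop skips blanks then takes the content run
lemma pvStepA_phase1 (ls : List (List Char)) :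
    (ls.foldl pvStepA ([], false)).1
      = (pvTakeContent (pvSkipBlank (ls.map PySem.Chars.strip))).map
          (fun l => PySem.Chars.strip (l.dropWhile (fun c => c == '>' || c == ' '))) := by
  induction ls with
  | nil => simp [pvSkipBlank, pvTakeContent]
  | cons l ls ih =>
    by_cases hb : PySem.Chars.strip l = []
    · simp [List.foldl_cons, pvStepA, hb, ih, pvSkipBlank]
    · by_cases hs : PySem.Chars.startswith (PySem.Chars.strip l) ['#', '#', ' '] = true
      · simp [List.foldl_cons, pvStepA, hb, hs, pvStepA_done, pvSkipBlank, pvTakeContent]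
      · have hne : ([PySem.Chars.strip ((PySem.Chars.strip l).dropWhile (fun c => c == '>' || c == ' '))] : List (List Char)) ≠ [] := by simp
        simp [List.foldl_cons, pvStepA, hb, hs, pvStepA_phase2 _ _ hne, pvSkipBlank, pvTakeContent]

-- ===== VERDICT (by name: the statement is the Claim_ definition above) =====
theorem extract_section_after_heading_py_spec : Claim_equal_extract_section_after_heading_py := by
  intro text heading _ _
  unfold Spec_extract_section_after_heading_py
  unfold extract_section_after_heading_py extract_section_after_heading_py_alt
  by_cases hin : PySem.Str.isIn heading text = false
  · rw [if_pos hin, if_pos hin]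
  · rw [if_neg hin, if_neg hin]
    cases hsp : PySem.Chars.splitMax? text.toList heading.toList 1 with
    | none => rfl
    | some parts =>
      cases hg : PySem.List.pyGet? parts 1 with
      | none => simp [hg]
      | some sec => simp [hg, pvStepA_phase1]
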